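-- pv_equiv track=rewrite | github.com/poutila/doxstrux | files (6)/ai_task_list_linter_v1_4.py | _check_command_output_pairs
-- ===== SOURCE A (Python) =====
-- from typing import Dict, List, Optional, Tuple
--
-- def _check_command_output_pairs(block_lines: List[str]) -> List[int]:
--     """
--     Check that each $ command line has at least one non-empty output line after it.
--     Returns list of line indices (relative to block) where output is missing.
--     """
--     missing = []
--     i = 0
--     while i < len(block_lines):
--         ln = block_lines[i].strip()
--         if ln.startswith("$"):
--             # Found a command, check for output
--             has_output = False
--             for j in range(i + 1, len(block_lines)):
--                 next_ln = block_lines[j].strip()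
--                 if next_ln.startswith("$"):
--                     # Next command, no output found
--                     break
--                 if next_ln == "```" or next_ln.startswith("```"):
--                     # End of block
--                     break
--                 if next_ln:
--                     has_output = True
--                     break
--             if not has_output:
--                 missing.append(i)
--         i += 1
--     return missing
-- ===== SOURCE B (Python) =====
-- def _check_command_output_pairs(block_lines):
--     """One forward pass: 'pending' holds the index of the last $-command whose
--     first following non-blank line has not yet been seen."""
--     missing = []
--     pending = None
--     for i, raw in enumerate(block_lines):
--         ln = raw.strip()
--         if not ln:
--             continue
--         if pending is not None:
--             if ln.startswith("$") or ln.startswith("```"):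
--                 missing.append(pending)
--             pending = None
--         if ln.startswith("$"):
--             pending = i
--     if pending is not None:
--         missing.append(pending)
--     return missing
-- ===== Notes on version B (the rewrite author's own statement) =====
-- stated objective: alternative
-- what changed: Replaces A's outer index loop with a forward rescan after each $-command by a single forward pass that carries the index of the last still-unresolved command and resolves it at the first following non-blank line (flushed at end of block).
import Mathlib
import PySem

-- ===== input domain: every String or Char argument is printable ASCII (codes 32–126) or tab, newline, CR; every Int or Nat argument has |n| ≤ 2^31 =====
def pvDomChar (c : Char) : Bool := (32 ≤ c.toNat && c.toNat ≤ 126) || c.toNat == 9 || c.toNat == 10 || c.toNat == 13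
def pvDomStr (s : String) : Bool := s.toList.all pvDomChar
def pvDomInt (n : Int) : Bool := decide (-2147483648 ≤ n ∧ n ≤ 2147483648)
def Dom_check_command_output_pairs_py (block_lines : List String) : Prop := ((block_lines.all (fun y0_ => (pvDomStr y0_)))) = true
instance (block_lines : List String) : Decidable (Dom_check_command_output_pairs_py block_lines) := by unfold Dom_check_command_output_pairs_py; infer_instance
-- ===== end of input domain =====

-- B replaces A's index loop with a forward rescan per $-command by a single forward
-- pass carrying a 'pending unresolved command' state (different decomposition).

-- ===== PORT A =====
-- inner 'for j in range(i+1, len(block_lines))' loop of A, run over the suffix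
-- after the command line; returns has_output.
def pvAInner : List String → Bool
  | [] => false
  | s :: rest =>
    let next_ln := PySem.Str.strip s
    if PySem.Str.startswith next_ln "$" then false
    else if next_ln == "```" || PySem.Str.startswith next_ln "```" then false
    else if next_ln != "" then true
    else pvAInner rest

-- outer 'while i < len(block_lines)' loop of A, carrying the index i.
def pvALoop : Int → List String → List Int
  | _, [] => []
  | i, s :: rest =>
    let ln := PySem.Str.strip s
    if PySem.Str.startswith ln "$" then
      (if pvAInner rest then [] else [i]) ++ pvALoop (i + 1) rest
    else pvALoop (i + 1) rest

def check_command_output_pairs_py (block_lines : List String) : List Int :=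
  pvALoop 0 block_lines

-- ===== PORT B =====
-- single forward pass; 'pending' = index of the last $-command not yet resolved;
-- the trailing unresolved command is flushed at the end of the list.
def pvBLoop : Int → Option Int → List String → List Int
  | _, none, [] => []
  | _, some p, [] => [p]
  | i, pending, s :: rest =>
    let ln := PySem.Str.strip s
    if ln == "" then pvBLoop (i + 1) pending rest
    else
      (match pending with
        | some p =>
          if PySem.Str.startswith ln "$" || PySem.Str.startswith ln "```" then [p] else []
        | none => []) ++
      pvBLoop (i + 1) (if PySem.Str.startswith ln "$" then some i else none) rest

def check_command_output_pairs_py_alt (block_lines : List String) : List Int :=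
  pvBLoop 0 none block_lines

-- ===== PRECONDITION & SPEC =====
def Spec_check_command_output_pairs_py (block_lines : List String) (out : List Int) : Prop := out = check_command_output_pairs_py_alt block_lines
instance (block_lines : List String) (out : List Int) : Decidable (Spec_check_command_output_pairs_py block_lines out) := by unfold Spec_check_command_output_pairs_py; infer_instance

-- ===== CLAIM (what is proved, stated in full; the proofs are below) =====
def Claim_equal_check_command_output_pairs_py : Prop := ∀ (block_lines : List String), Dom_check_command_output_pairs_py block_lines → Spec_check_command_output_pairs_py block_lines (check_command_output_pairs_py block_lines)

-- ===== LEMMAS AND PROOFS =====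

-- A stripped line starting with "$" cannot also satisfy the fence test, and a
-- line equal to "```" starts with "```".
theorem pv_startswith_of_eq_bt (s : String) (h : s = "```") :
    PySem.Str.startswith s "```" = true := by
  subst h; decide

-- With a pending command p, B's pass returns [p] first iff A's inner scan finds no
-- output in the suffix, and then continues exactly like a pass with no pending.
theorem pvB_some (xs : List String) (i p : Int) :
    pvBLoop i (some p) xs = (if pvAInner xs then [] else [p]) ++ pvBLoop i none xs := by
  induction xs generalizing i with
  | nil => simp [pvBLoop, pvAInner]
  | cons s rest ih =>
    by_cases hblank : PySem.Str.strip s = ""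
    · have hb : PySem.Chars.strip s.toList = [] := by
        have := congrArg String.toList hblank; simpa [PySem.Str.strip] using this
      have e1 : PySem.Chars.startswith ([] : List Char) ['$'] = false := by decide
      have e2 : PySem.Chars.startswith ([] : List Char) ['`','`','`'] = false := by decide
      simp [pvBLoop, pvAInner, hblank, e1, e2, ih]
    · by_cases hd : PySem.Str.startswith (PySem.Str.strip s) "$" = true
      · simp at hd
        simp [pvBLoop, pvAInner, hblank, hd]
      · simp at hd
        by_cases hf : (PySem.Str.strip s == "```" || PySem.Str.startswith (PySem.Str.strip s) "```") = true
        · have hsw : PySem.Str.startswith (PySem.Str.strip s) "```" = true := by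
            rcases Bool.or_eq_true_iff.mp hf with h | h
            · exact pv_startswith_of_eq_bt _ (by simpa using h)
            · exact h
          simp at hsw
          simp [pvBLoop, pvAInner, hblank, hd, hsw]
        · have hne : ¬ PySem.Str.strip s = "```" := by
            intro h; exact hf (by simp [h])
          have hsw : PySem.Str.startswith (PySem.Str.strip s) "```" = false := by
            simp only [Bool.or_eq_true_iff, not_or] at hf
            exact Bool.eq_false_iff.mpr hf.2
          simp at hsw
          simp [pvBLoop, pvAInner, hblank, hne, hd, hsw]

-- With no pending command, B's pass computes exactly A's outer loop.
theorem pvA_eq_pvB_none (xs : List String) (i : Int) :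
    pvALoop i xs = pvBLoop i none xs := by
  induction xs generalizing i with
  | nil => simp [pvALoop, pvBLoop]
  | cons s rest ih =>
    by_cases hblank : PySem.Str.strip s = ""
    · have hb : PySem.Chars.strip s.toList = [] := by
        have := congrArg String.toList hblank; simpa [PySem.Str.strip] using this
      have e1 : PySem.Chars.startswith ([] : List Char) ['$'] = false := by decide
      simp [pvALoop, pvBLoop, hblank, e1, ih]
    · by_cases hd : PySem.Str.startswith (PySem.Str.strip s) "$" = true
      all_goals simp at hd
      · simp [pvALoop, pvBLoop, hblank, hd, pvB_some, ih]
      · simp [pvALoop, pvBLoop, hblank, hd, ih]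

-- ===== VERDICT (by name: the statement is the Claim_ definition above) =====
theorem check_command_output_pairs_py_spec : Claim_equal_check_command_output_pairs_py := by
  intro bl _
  unfold Spec_check_command_output_pairs_py check_command_output_pairs_py check_command_output_pairs_py_alt
  exact pvA_eq_pvB_none bl 0
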